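-- pv_equiv track=rewrite | github.com/kimikadze/web-rcat | flask_app/rcat/relations_module.py | find_character_positions
-- ===== SOURCE A (Python) =====
-- def find_character_positions(text_tokenized, characters_tokenized):
--     characters_indices = list()
--     for character_list in characters_tokenized:
--         character_index = list()
--         for character_synonym in character_list:
--             if len(character_synonym) == 1:
--                 character_index += [[item] for item in range(len(text_tokenized)) if
--                                     text_tokenized[item] == character_synonym[0]]
--             elif len(character_synonym) > 1:
--                 for word_index in range(len(text_tokenized)):
--                     if text_tokenized[word_index:word_index + (len(character_synonym))] == character_synonym:
--                         character_index += [[i for i in range(word_index, word_index + (len(character_synonym)))]]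
--         characters_indices += [character_index]
--     return characters_indices
-- ===== SOURCE B (Python) =====
-- def find_character_positions(text_tokenized, characters_tokenized):
--     index = {}
--     for pos in range(len(text_tokenized)):
--         index.setdefault(text_tokenized[pos], []).append(pos)
--     result = []
--     for character_list in characters_tokenized:
--         character_index = []
--         for synonym in character_list:
--             k = len(synonym)
--             if k == 1:
--                 character_index.extend([p] for p in index.get(synonym[0], []))
--             elif k > 1:
--                 tail = synonym[1:]
--                 for start in index.get(synonym[0], []):
--                     if text_tokenized[start + 1:start + k] == tail:
--                         character_index.append(list(range(start, start + k)))
--         result.append(character_index)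
--     return result
-- ===== Notes on version B (the rewrite author's own statement) =====
-- stated objective: alternative
-- what changed: B builds a token-to-positions index over the text once and replaces A's per-synonym full-text scan: single-word synonyms become a single index lookup, and multi-word synonyms only verify the tail slice at the positions where their first word occurs.
import Mathlib
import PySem

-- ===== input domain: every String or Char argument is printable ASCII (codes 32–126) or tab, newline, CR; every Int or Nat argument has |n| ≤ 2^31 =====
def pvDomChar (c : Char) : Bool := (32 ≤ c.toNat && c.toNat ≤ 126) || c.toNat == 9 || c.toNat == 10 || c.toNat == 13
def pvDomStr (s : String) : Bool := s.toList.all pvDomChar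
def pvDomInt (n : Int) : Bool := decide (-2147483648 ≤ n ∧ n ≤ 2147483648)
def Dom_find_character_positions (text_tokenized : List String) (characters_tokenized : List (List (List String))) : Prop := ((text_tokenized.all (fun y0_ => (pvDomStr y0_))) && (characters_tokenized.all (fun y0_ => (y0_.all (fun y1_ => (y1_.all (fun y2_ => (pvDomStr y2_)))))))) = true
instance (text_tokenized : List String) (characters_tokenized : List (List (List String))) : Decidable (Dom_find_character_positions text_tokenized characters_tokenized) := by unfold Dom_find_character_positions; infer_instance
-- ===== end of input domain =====

-- B replaces A's full-text scan per synonym by a token→positions index built once: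
-- single-word synonyms are direct lookups, multi-word ones only verify candidate starts
-- where the first word occurs (objective: alternative).

-- ===== PORT A =====
def find_character_positions (text_tokenized : List String) (characters_tokenized : List (List (List String))) : List (List (List Int)) :=
  characters_tokenized.foldl (fun characters_indices character_list =>
    characters_indices ++ [character_list.foldl (fun character_index character_synonym =>
      if character_synonym.length = 1 then
        character_index ++
          ((PySem.List.pyRange 0 (text_tokenized.length : Int) 1).filter
              (fun item => PySem.List.pyGetD text_tokenized item "" == PySem.List.pyGetD character_synonym 0 "")).map
            (fun item => [item])
      else if 1 < character_synonym.length then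
        (PySem.List.pyRange 0 (text_tokenized.length : Int) 1).foldl (fun character_index word_index =>
          if PySem.List.slice text_tokenized (some word_index) (some (word_index + (character_synonym.length : Int)))
               == character_synonym then
            character_index ++ [PySem.List.pyRange word_index (word_index + (character_synonym.length : Int)) 1]
          else character_index) character_index
      else character_index) []]) []

-- ===== PORT B =====
def find_character_positions_alt (text_tokenized : List String) (characters_tokenized : List (List (List String))) : List (List (List Int)) :=
  let index : PySem.Dict String (List Int) :=
    (PySem.List.pyRange 0 (text_tokenized.length : Int) 1).foldl
      (fun d pos => d.modify (PySem.List.pyGetD text_tokenized pos "") [] (fun v => v ++ [pos]))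
      PySem.Dict.empty
  characters_tokenized.foldl (fun result character_list =>
    result ++ [character_list.foldl (fun character_index synonym =>
      if synonym.length = 1 then
        character_index ++ (index.getD (PySem.List.pyGetD synonym 0 "") []).map (fun p => [p])
      else if 1 < synonym.length then
        let tail := PySem.List.slice synonym (some 1) none
        (index.getD (PySem.List.pyGetD synonym 0 "") []).foldl (fun character_index start =>
          if PySem.List.slice text_tokenized (some (start + 1)) (some (start + (synonym.length : Int)))
               == tail then
            character_index ++ [PySem.List.pyRange start (start + (synonym.length : Int)) 1]
          else character_index) character_index
      else character_index) []]) []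

-- ===== PRECONDITION & SPEC =====
def Spec_find_character_positions (text_tokenized : List String) (characters_tokenized : List (List (List String))) (out : List (List (List Int))) : Prop := out = find_character_positions_alt text_tokenized characters_tokenized
instance (text_tokenized : List String) (characters_tokenized : List (List (List String))) (out : List (List (List Int))) : Decidable (Spec_find_character_positions text_tokenized characters_tokenized out) := by unfold Spec_find_character_positions; infer_instance

-- ===== CLAIM (what is proved, stated in full; the proofs are below) =====
def Claim_equal_find_character_positions : Prop := ∀ (text_tokenized : List String) (characters_tokenized : List (List (List String))), Dom_find_character_positions text_tokenized characters_tokenized → Spec_find_character_positions text_tokenized characters_tokenized (find_character_positions text_tokenized characters_tokenized)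

-- ===== LEMMAS AND PROOFS =====

-- The index built by B, looked up at any token, is exactly the list of positions of that token.
theorem getD_buildIndex (text : List String) (tok : String) :
    ((PySem.List.pyRange 0 (text.length : Int) 1).foldl
        (fun d pos => d.modify (PySem.List.pyGetD text pos "") [] (fun v => v ++ [pos]))
        (PySem.Dict.empty : PySem.Dict String (List Int))).getD tok []
    = (PySem.List.pyRange 0 (text.length : Int) 1).filter
        (fun i => PySem.List.pyGetD text i "" == tok) := by
  have h1 : (PySem.List.pyRange 0 (text.length : Int) 1).foldl
        (fun d pos => d.modify (PySem.List.pyGetD text pos "") [] (fun v => v ++ [pos]))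
        (PySem.Dict.empty : PySem.Dict String (List Int))
      = ((PySem.List.pyRange 0 (text.length : Int) 1).map
          (fun i => (PySem.List.pyGetD text i "", i))).foldl
          (fun d p => d.modify p.1 [] (fun v => v ++ [p.2])) PySem.Dict.empty :=
    by rw [List.foldl_map]
  rw [h1, PySem.Dict.getD_foldl_modify_append, PySem.Dict.getD_empty,
    List.filter_map, List.map_map]
  simp [Function.comp_def]

-- Matching the whole synonym at i is the same as matching its head at i and its tail from i+1.
theorem filter_match (text : List String) (h : String) (t : List String) :
    ((PySem.List.pyRange 0 (text.length : Int) 1).filter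
        (fun i => PySem.List.pyGetD text i "" == h)).filter
      (fun i => PySem.List.slice text (some (i + 1)) (some (i + ((h :: t).length : Int))) == t)
    = (PySem.List.pyRange 0 (text.length : Int) 1).filter
        (fun i => PySem.List.slice text (some i) (some (i + ((h :: t).length : Int))) == h :: t) := by
  rw [List.filter_filter]
  apply List.filter_congr
  intro i hi
  obtain ⟨h0, hlt⟩ := (PySem.List.mem_pyRange_one).mp hi
  obtain ⟨m, rfl⟩ : ∃ m : Nat, i = (m : Int) := ⟨i.toNat, (Int.toNat_of_nonneg h0).symm⟩
  have hm : m < text.length := by exact_mod_cast hlt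
  have e1 : PySem.List.slice text (some (m : Int)) (some ((m : Int) + ((h :: t).length : Int)))
      = (text.drop m).take (t.length + 1) := by
    rw [show ((h :: t).length : Int) = ((t.length + 1 : Nat) : Int) by push_cast [List.length_cons]; omega,
      PySem.List.slice_natCast_add]
  have e2 : PySem.List.slice text (some ((m : Int) + 1)) (some ((m : Int) + ((h :: t).length : Int)))
      = (text.drop (m + 1)).take t.length := by
    rw [show ((m : Int) + 1) = ((m + 1 : Nat) : Int) by push_cast [List.length_cons]; omega,
      show ((m : Int) + ((h :: t).length : Int)) = (((m + 1) : Nat) : Int) + ((t.length : Nat) : Int) by push_cast [List.length_cons]; omega,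
      PySem.List.slice_natCast_add]
  rw [e1, e2, List.drop_eq_getElem_cons hm, List.take_succ_cons,
    PySem.List.pyGetD_natCast, List.getD_eq_getElem text "" hm]
  rw [List.cons_beq_cons]
  exact Bool.and_comm _ _

-- ===== VERDICT (by name: the statement is the Claim_ definition above) =====
theorem find_character_positions_spec : Claim_equal_find_character_positions := by
  intro text chars _dom
  unfold Spec_find_character_positions find_character_positions find_character_positions_alt
  apply PySem.List.foldl_congr_mem
  intro acc cl _
  congr 1
  congr 1
  apply PySem.List.foldl_congr_mem
  intro ci syn _
  match syn with
  | [] => rfl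
  | [h] =>
      simp only [List.length_singleton, PySem.List.pyGetD_zero_cons,
        getD_buildIndex, if_true]
  | h :: t :: ts =>
      have hlen : (h :: t :: ts).length ≠ 1 := by simp
      have hlt : 1 < (h :: t :: ts).length := by simp
      rw [if_neg hlen, if_neg hlen, if_pos hlt, if_pos hlt,
        PySem.List.pyGetD_zero_cons, getD_buildIndex,
        PySem.List.foldl_append_if, PySem.List.foldl_append_if,
        PySem.List.slice_from_one, List.tail_cons,
        filter_match text h (t :: ts)]
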